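-- pv_equiv track=rewrite | github.com/LennartvdM/Wyrd-Engine | tes/overlay.py | _binary_erosion
-- ===== SOURCE A (Python) =====
-- from typing import Dict, Iterable, List, Optional, Sequence, Tuple
--
-- def _binary_erosion(mask: Sequence[bool], width: int) -> List[bool]:
--     if width <= 1:
--         return [bool(v) for v in mask]
--     length = len(mask)
--     result = [False] * length
--     radius = width // 2
--     for idx in range(length):
--         start = max(0, idx - radius)
--         end = min(length, idx + radius + 1)
--         window = mask[start:end]
--         result[idx] = len(window) == (end - start) and all(window)
--     return result
-- ===== SOURCE B (Python) =====
-- def _binary_erosion(mask, width):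
--     if width <= 1:
--         return [bool(v) for v in mask]
--     n = len(mask)
--     radius = width // 2
--     # prefix[k] = number of falsy entries among mask[:k]
--     prefix = [0]
--     c = 0
--     for v in mask:
--         if not v:
--             c += 1
--         prefix.append(c)
--     out = []
--     for idx in range(n):
--         start = max(0, idx - radius)
--         end = min(n, idx + radius + 1)
--         out.append(prefix[end] - prefix[start] == 0)
--     return out
-- ===== Notes on version B (the rewrite author's own statement) =====
-- stated objective: faster
-- what changed: Replaces the per-index window slice + all() scan (O(n*width)) by a single prefix-sum of falsy counts so each window's all-True test is an O(1) subtraction.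
import Mathlib
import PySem

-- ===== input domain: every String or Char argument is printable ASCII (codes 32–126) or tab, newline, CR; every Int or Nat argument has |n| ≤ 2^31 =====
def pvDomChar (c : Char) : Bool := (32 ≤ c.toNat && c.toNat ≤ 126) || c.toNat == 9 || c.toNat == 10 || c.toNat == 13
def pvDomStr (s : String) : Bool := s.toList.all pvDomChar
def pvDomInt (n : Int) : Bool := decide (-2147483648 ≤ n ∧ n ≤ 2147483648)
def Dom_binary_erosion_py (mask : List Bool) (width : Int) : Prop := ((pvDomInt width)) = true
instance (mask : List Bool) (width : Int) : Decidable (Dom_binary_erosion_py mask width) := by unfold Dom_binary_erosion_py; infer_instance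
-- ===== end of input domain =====

-- B replaces A's per-index window slice + all() scan by one prefix-sum of falsy
-- counts, making each window test an O(1) subtraction (measured faster, asymptotic).

-- ===== PORT A =====
def binary_erosion_py (mask : List Bool) (width : Int) : List Bool :=
  if width ≤ 1 then mask.map (fun v => v)
  else
    let length : Int := mask.length
    let radius : Int := PySem.Int.floordiv width 2
    (PySem.List.pyRange 0 length 1).foldl
      (fun result idx =>
        let start := max 0 (idx - radius)
        let stop := min length (idx + radius + 1)
        let window := PySem.List.slice mask (some start) (some stop)
        result.set idx.toNat
          (decide ((window.length : Int) = stop - start) && window.all (fun v => v)))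
      (List.replicate mask.length false)

-- ===== PORT B =====
def binary_erosion_py_alt (mask : List Bool) (width : Int) : List Bool :=
  if width ≤ 1 then mask.map (fun v => v)
  else
    let n : Int := mask.length
    let radius : Int := PySem.Int.floordiv width 2
    -- prefix[k] = number of falsy entries among mask[:k], built in one pass
    let pc := mask.foldl
      (fun st v =>
        let c := st.2 + (if v then 0 else 1)
        (st.1 ++ [c], c))
      (([(0 : Int)] : List Int), (0 : Int))
    let pref := pc.1
    -- prefix[end] / prefix[start]: always in range, ported with getD (exact here)
    (PySem.List.pyRange 0 n 1).map
      (fun idx =>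
        let start := max 0 (idx - radius)
        let stop := min n (idx + radius + 1)
        decide (pref.getD stop.toNat 0 - pref.getD start.toNat 0 = 0))

-- ===== PRECONDITION & SPEC =====
def Spec_binary_erosion_py (mask : List Bool) (width : Int) (out : List Bool) : Prop := out = binary_erosion_py_alt mask width
instance (mask : List Bool) (width : Int) (out : List Bool) : Decidable (Spec_binary_erosion_py mask width out) := by unfold Spec_binary_erosion_py; infer_instance

-- ===== CLAIM (what is proved, stated in full; the proofs are below) =====
def Claim_equal_binary_erosion_py : Prop := ∀ (mask : List Bool) (width : Int), Dom_binary_erosion_py mask width → Spec_binary_erosion_py mask width (binary_erosion_py mask width)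

-- ===== LEMMAS AND PROOFS =====

-- falsy count of a Bool list, as an Int
def pvCF (l : List Bool) : Int := l.countP (fun v => !v)

theorem pvCF_append (l₁ l₂ : List Bool) : pvCF (l₁ ++ l₂) = pvCF l₁ + pvCF l₂ := by
  simp [pvCF, List.countP_append]

-- the prefix-sum foldl of B, characterised
theorem pv_prefix_spec (l : List Bool) : ∀ (p : List Int) (c : Int),
    l.foldl (fun st v => let c := st.2 + (if v then 0 else 1); (st.1 ++ [c], c)) (p, c)
      = (p ++ (List.range l.length).map (fun k => c + pvCF (l.take (k + 1))), c + pvCF l) := by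
  induction l with
  | nil => intro p c; simp [pvCF]
  | cons v t ih =>
    intro p c
    have hd : pvCF [v] = (if v then 0 else 1) := by cases v <;> simp [pvCF]
    simp only [List.foldl_cons]
    rw [ih]
    cases v <;>
      simp [pvCF, List.range_succ_eq_map, List.map_map, Function.comp_def,
        Prod.ext_iff, List.take_succ_cons] <;>
      constructor <;> omega

-- foldl that sets index i to f i, over range n, on an accumulator of length ≥ n
theorem pv_foldl_set (f : Nat → Bool) : ∀ (n : Nat) (acc : List Bool), n ≤ acc.length →
    (List.range n).foldl (fun res i => res.set i (f i)) acc
      = (List.range n).map f ++ acc.drop n := by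
  intro n
  induction n with
  | zero => simp
  | succ m ih =>
    intro acc h
    rw [List.range_succ, List.foldl_append, ih acc (by omega)]
    simp only [List.foldl_cons, List.foldl_nil]
    rw [List.set_append_right _ _ (by simp)]
    simp only [List.length_map, List.length_range, Nat.sub_self]
    rw [List.drop_eq_getElem_cons (show m < acc.length by omega), List.set_cons_zero]
    simp [List.range_succ]

-- getD into the prefix list built by B
theorem pv_pref_getD (mask : List Bool) (j : Nat) (hj : j ≤ mask.length) :
    (((0 : Int) :: (List.range mask.length).map
        (fun k => pvCF (mask.take (k + 1)))).getD j 0)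
      = pvCF (mask.take j) := by
  cases j with
  | zero => simp [pvCF]
  | succ m =>
    have hm : m < mask.length := by omega
    simp [List.getD, List.getElem?_map, List.getElem?_range hm]

-- the window all-True test is the prefix-difference test
theorem pv_window_eq (mask : List Bool) (s e : Nat) (hs : s ≤ e) :
    ((mask.drop s).take (e - s)).all (fun v => v)
      = decide (pvCF (mask.take e) - pvCF (mask.take s) = 0) := by
  have htake : mask.take e = mask.take s ++ (mask.drop s).take (e - s) := by
    rw [← List.take_add]; congr 1; omega
  rw [htake, pvCF_append, add_sub_cancel_left]
  rw [Bool.eq_iff_iff]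
  simp [pvCF, List.all_eq_true, List.countP_eq_zero]

theorem binary_erosion_py_spec : Claim_equal_binary_erosion_py := by
  intro mask width _
  unfold Spec_binary_erosion_py binary_erosion_py binary_erosion_py_alt
  by_cases hw : width ≤ 1
  · simp [hw]
  · simp only [if_neg hw]
    rw [pv_prefix_spec]
    rw [PySem.List.pyRange_one]
    simp only [Int.sub_zero, Int.toNat_natCast, List.foldl_map, List.map_map, zero_add]
    rw [pv_foldl_set _ mask.length (List.replicate mask.length false) (by simp)]
    simp only [List.drop_replicate, Nat.sub_self, List.replicate_zero, List.append_nil]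
    refine List.map_congr_left (fun k hk => ?_)
    rw [List.mem_range] at hk
    simp only [Function.comp_apply]
    have hr : 1 ≤ PySem.Int.floordiv width 2 := by
      rw [PySem.Int.floordiv_eq_ediv_of_pos (by omega)]; omega
    set r := PySem.Int.floordiv width 2 with hrdef
    have hn : (k : Int) < (mask.length : Int) := by exact_mod_cast hk
    have h0s : (0 : Int) ≤ max 0 ((k : Int) - r) := le_max_left _ _
    have h0e : (0 : Int) ≤ min (mask.length : Int) ((k : Int) + r + 1) :=
      le_min (by positivity) (by positivity)
    rw [PySem.List.slice_toNat _ h0s h0e]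
    set s := (max 0 ((k : Int) - r)).toNat with hsdef
    set e := (min (mask.length : Int) ((k : Int) + r + 1)).toNat with hedef
    have hsi : (s : Int) = max 0 ((k : Int) - r) := Int.toNat_of_nonneg h0s
    have hei : (e : Int) = min (mask.length : Int) ((k : Int) + r + 1) :=
      Int.toNat_of_nonneg h0e
    have hsk : s ≤ k := by omega
    have hke : k < e := by omega
    have hen : e ≤ mask.length := by omega
    have hse : s ≤ e := by omega
    have h1 : (decide ((((mask.drop s).take (e - s)).length : Int)
        = min (mask.length : Int) ((k : Int) + r + 1) - max 0 ((k : Int) - r))) = true := by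
      simp only [decide_eq_true_eq, List.length_take, List.length_drop]
      push_cast
      omega
    rw [h1, Bool.true_and]
    rw [pv_window_eq mask s e hse]
    rw [List.singleton_append]
    rw [pv_pref_getD mask e hen, pv_pref_getD mask s (by omega)]
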